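-- pv_equiv track=rewrite | github.com/iamroshandamor20/E_Challan-Project | p5.py | mother_name_check
-- ===== SOURCE A (Python) =====
-- def mother_name_check(mother_name):
--     fname_len = len(mother_name)
--     fname_digit = False
--     for ele in mother_name:
--         if ele.isdigit():
--             fname_digit = True
--             break
--
--     fname_special = False
--     for ele in mother_name:
--         if not ele.isalpha() or ele.isspace() or ele.isdigit():
--             fname_special = True
--             break
--
--     if fname_len > 3:
--         if fname_digit is False or fname_special is False:
--             return 1
--         else:
--             return 0
--     else:
--         return 0
-- ===== SOURCE B (Python) =====
-- def mother_name_check(mother_name):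
--     # Single scan: A's "no digit OR all alpha" collapses to "no digit",
--     # since the special-char scan's condition itself includes isdigit.
--     has_digit = any(c.isdigit() for c in mother_name)
--     return 1 if len(mother_name) > 3 and not has_digit else 0
-- ===== Notes on version B (the rewrite author's own statement) =====
-- stated objective: simpler
-- what changed: Replaced A's two break-loops (digit scan and special-char scan) plus nested branching with a single any()-digit scan and one boolean expression, after observing that the no-special branch implies no-digit so the OR collapses.
import Mathlib
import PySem

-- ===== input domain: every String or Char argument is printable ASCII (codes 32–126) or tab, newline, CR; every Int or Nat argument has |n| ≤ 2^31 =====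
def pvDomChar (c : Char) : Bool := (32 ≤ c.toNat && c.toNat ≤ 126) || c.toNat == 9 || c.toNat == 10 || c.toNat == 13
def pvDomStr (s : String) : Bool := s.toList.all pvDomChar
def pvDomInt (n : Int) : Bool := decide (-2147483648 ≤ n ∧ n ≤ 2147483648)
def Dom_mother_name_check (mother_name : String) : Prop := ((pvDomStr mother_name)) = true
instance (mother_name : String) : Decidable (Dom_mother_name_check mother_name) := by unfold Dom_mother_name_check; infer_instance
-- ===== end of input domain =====

-- B replaces A's two break-loops and nested branching by one digit scan and a single boolean; return value only, same O(n) cost.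
-- ===== PORT A =====
-- the first for-loop: scan for a digit, breaking at the first one
def pvScanDigit : List Char → Bool
  | [] => false
  | c :: cs => if PySem.Chars.isdigit c then true else pvScanDigit cs

-- the second for-loop: scan for a "special" character, breaking at the first one
def pvScanSpecial : List Char → Bool
  | [] => false
  | c :: cs =>
      if !PySem.Chars.isalpha c || PySem.Chars.isspace c || PySem.Chars.isdigit c then true
      else pvScanSpecial cs

def mother_name_check (mother_name : String) : Int :=
  let fname_len := PySem.Str.len mother_name
  let fname_digit := pvScanDigit mother_name.toList
  let fname_special := pvScanSpecial mother_name.toList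
  if fname_len > 3 then
    if fname_digit = false ∨ fname_special = false then 1 else 0
  else 0

-- ===== PORT B =====
def mother_name_check_alt (mother_name : String) : Int :=
  let has_digit := mother_name.toList.any PySem.Chars.isdigit
  if PySem.Str.len mother_name > 3 ∧ !has_digit then 1 else 0

-- ===== PRECONDITION & SPEC =====
def Spec_mother_name_check (mother_name : String) (out : Int) : Prop := out = mother_name_check_alt mother_name
instance (mother_name : String) (out : Int) : Decidable (Spec_mother_name_check mother_name out) := by unfold Spec_mother_name_check; infer_instance

-- ===== CLAIM (what is proved, stated in full; the proofs are below) =====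
def Claim_equal_mother_name_check : Prop := ∀ (mother_name : String), Dom_mother_name_check mother_name → Spec_mother_name_check mother_name (mother_name_check mother_name)

-- ===== LEMMAS AND PROOFS =====

-- ===== VERDICT (by name: the statement is the Claim_ definition above) =====
lemma pvScanDigit_eq_any (cs : List Char) : pvScanDigit cs = cs.any PySem.Chars.isdigit := by
  induction cs with
  | nil => rfl
  | cons c cs ih =>
      simp only [pvScanDigit, List.any_cons, ih]
      by_cases h : PySem.Chars.isdigit c <;> simp [h]

lemma pvScanSpecial_of_digit (cs : List Char) (h : pvScanDigit cs = true) :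
    pvScanSpecial cs = true := by
  induction cs with
  | nil => simp [pvScanDigit] at h
  | cons c cs ih =>
      simp only [pvScanDigit] at h
      simp only [pvScanSpecial]
      split_ifs with hs
      · rfl
      · apply ih
        by_cases hd : PySem.Chars.isdigit c
        · simp [hd] at hs
        · simpa [hd] using h

theorem mother_name_check_spec : Claim_equal_mother_name_check := by
  intro s _
  unfold Spec_mother_name_check mother_name_check mother_name_check_alt
  simp only [← pvScanDigit_eq_any]
  by_cases h1 : PySem.Str.len s > 3
  · by_cases hd : pvScanDigit s.toList
    · have hs : pvScanSpecial s.toList = true := pvScanSpecial_of_digit _ hd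
      simp only [if_pos h1, hd, hs]
      simp
    · simp only [if_pos h1, hd]
      simp only [PySem.Str.len_eq] at h1 ⊢
      simp
      exact_mod_cast h1
  · simp only [if_neg h1]
    rw [if_neg]
    exact fun h => h1 h.1
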